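-- pv_equiv track=rewrite | github.com/kinfe19/Kattis-Questions-and-Answers | disgruntledjudge.py | fin
-- ===== SOURCE A (Python) =====
-- cn = 10001
--
-- def nor(v, a, b):
--     return (v*a + b) % cn
--
-- def fin(l):
--     x, y, z = l[:3]
--     for i in range(cn):
--         if abs(z-y) == abs((i**2*(y-x)) % cn):
--             for j in range(cn):
--                 f = 1
--                 for k in range(len(l)-1):
--                     if nor(nor(l[k], i, j), i, j) != l[k+1]:
--                         f = 0
--                         break
--                 if f:
--                     return i, j
--     return 0, 0
-- ===== SOURCE B (Python) =====
-- cn = 10001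
--
-- def fin(l):
--     # For each candidate i, solve the linear congruence j*(i+1) == y - x*i*i (mod cn)
--     # with an inline extended Euclid and try only its gcd(i+1, cn) solutions j,
--     # each verified with one pass over consecutive pairs using the composed affine map.
--     x, y, z = l[:3]
--     d = abs(z - y)
--     if d >= cn:
--         # abs(m % cn) < cn for every m, so the i-filter can never pass
--         return 0, 0
--     pairs = list(zip(l, l[1:]))
--     for i in range(cn):
--         if d != abs(i * i * (y - x) % cn):
--             continue
--         a = i * i % cn
--         c = (y - x * i * i) % cn
--         aa, bb, u, u1 = i + 1, cn, 1, 0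
--         while bb:
--             q = aa // bb
--             aa, bb, u, u1 = bb, aa - q * bb, u1, u - q * u1
--         g = aa
--         if c % g:
--             continue
--         m = cn // g
--         j0 = c // g * u % m
--         for k in range(g):
--             j = j0 + k * m
--             b = (i * j + j) % cn
--             if all((p * a + b) % cn == q for p, q in pairs):
--                 return i, j
--     return 0, 0
-- ===== Notes on version B (the rewrite author's own statement) =====
-- stated objective: alternative
-- what changed: Instead of scanning every j in range(cn) for each candidate i, B solves the necessary linear congruence j*(i+1) == y - x*i*i (mod cn) with an inline extended Euclid and tries only its gcd(i+1,cn) solutions, verifying each with one pass over the precomputed consecutive pairs; it also returns (0,0) immediately when abs(z-y) >= cn since the i-filter can then never hold.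
import Mathlib
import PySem

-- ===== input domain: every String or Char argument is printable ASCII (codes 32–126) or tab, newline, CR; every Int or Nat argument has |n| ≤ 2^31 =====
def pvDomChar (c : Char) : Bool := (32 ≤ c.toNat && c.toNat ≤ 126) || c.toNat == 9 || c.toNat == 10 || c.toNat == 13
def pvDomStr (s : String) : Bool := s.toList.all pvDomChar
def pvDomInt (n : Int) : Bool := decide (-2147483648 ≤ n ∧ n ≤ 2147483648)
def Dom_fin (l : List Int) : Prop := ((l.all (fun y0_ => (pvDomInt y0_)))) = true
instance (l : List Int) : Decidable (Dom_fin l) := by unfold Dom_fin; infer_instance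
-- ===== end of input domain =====

-- ===== PORT A =====
-- B solves the linear congruence j*(i+1) ≡ y - x*i*i (mod cn) by extended Euclid and tries only its solutions instead of scanning all j in range(cn); the claim is about return values.
def pvCn : Int := 10001

def pvNor (v a b : Int) : Int := PySem.Int.mod (v * a + b) pvCn

-- the inner k-loop with the break flag: all consecutive pairs satisfy the double-nor step
def pvCheckA (l : List Int) (i j : Int) : Bool :=
  (PySem.List.pyRange 0 ((l.length : Int) - 1) 1).all (fun k =>
    pvNor (pvNor (PySem.List.pyGetD l k 0) i j) i j == PySem.List.pyGetD l (k + 1) 0)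

def pvFinA (l : List Int) (x y z : Int) : List Int → Int × Int
  | [] => (0, 0)
  | i :: is =>
    if |z - y| == |PySem.Int.mod (i ^ 2 * (y - x)) pvCn| then
      match (PySem.List.pyRange 0 pvCn 1).find? (fun j => pvCheckA l i j) with
      | some j => (i, j)
      | none => pvFinA l x y z is
    else pvFinA l x y z is

def fin (l : List Int) : Int × Int :=
  match l with
  | x :: y :: z :: _ => pvFinA l x y z (PySem.List.pyRange 0 pvCn 1)
  | _ => (0, 0)    -- Python raises ValueError here (len(l) < 3); excluded by Pre_fin

-- ===== PORT B =====
def pvEgcdLoop (aa bb u u1 : Int) : Int × Int :=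
  if bb = 0 then (aa, u)
  else
    pvEgcdLoop bb (aa - PySem.Int.floordiv aa bb * bb) u1 (u - PySem.Int.floordiv aa bb * u1)
termination_by bb.natAbs
decreasing_by
  rename_i hb
  have hid := PySem.Int.floordiv_mul_add_mod aa bb
  have he : aa - PySem.Int.floordiv aa bb * bb = PySem.Int.mod aa bb := by omega
  rw [he]
  rcases lt_trichotomy bb 0 with h | h | h
  · have := PySem.Int.mod_neg_bounds aa h; omega
  · exact absurd h hb
  · have h1 := PySem.Int.mod_nonneg aa h; have h2 := PySem.Int.mod_lt aa h; omega

def pvCheckB (pairs : List (Int × Int)) (a b : Int) : Bool :=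
  pairs.all (fun p => PySem.Int.mod (p.1 * a + b) pvCn == p.2)

def pvFinBK (pairs : List (Int × Int)) (i a j0 m : Int) : List Int → Option (Int × Int)
  | [] => none
  | k :: ks =>
    let j := j0 + k * m
    let b := PySem.Int.mod (i * j + j) pvCn
    if pvCheckB pairs a b then some (i, j) else pvFinBK pairs i a j0 m ks

def pvFinB (pairs : List (Int × Int)) (x y d : Int) : List Int → Int × Int
  | [] => (0, 0)
  | i :: is =>
    if d ≠ |PySem.Int.mod (i * i * (y - x)) pvCn| then pvFinB pairs x y d is
    else
      let a := PySem.Int.mod (i * i) pvCn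
      let c := PySem.Int.mod (y - x * (i * i)) pvCn
      let e := pvEgcdLoop (i + 1) pvCn 1 0
      if PySem.Int.mod c e.1 ≠ 0 then pvFinB pairs x y d is
      else
        let m := PySem.Int.floordiv pvCn e.1
        let j0 := PySem.Int.mod (PySem.Int.floordiv c e.1 * e.2) m
        match pvFinBK pairs i a j0 m (PySem.List.pyRange 0 e.1 1) with
        | some r => r
        | none => pvFinB pairs x y d is

def fin_alt (l : List Int) : Int × Int :=
  match l with
  | [] => (0, 0)
  | [_] => (0, 0)
  | [_, _] => (0, 0)
  | x :: y :: z :: _ =>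
    let d := |z - y|
    if d ≥ pvCn then (0, 0)
    else
      let pairs := l.zip (PySem.List.slice l (some 1) none)
      pvFinB pairs x y d (PySem.List.pyRange 0 pvCn 1)

-- ===== PRECONDITION & SPEC =====
-- Python raises ValueError (unpacking x, y, z = l[:3]) when len(l) < 3; exactly those inputs are excluded.
def Pre_fin (l : List Int) : Prop := 3 ≤ l.length
instance (l : List Int) : Decidable (Pre_fin l) := by unfold Pre_fin; infer_instance
def pvWitness_fin : List Int := [0, 0, 0]
def Spec_fin (l : List Int) (out : Int × Int) : Prop := out = fin_alt l
instance (l : List Int) (out : Int × Int) : Decidable (Spec_fin l out) := by unfold Spec_fin; infer_instance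

-- ===== CLAIM (what is proved, stated in full; the proofs are below) =====
def Claim_equal_fin : Prop := ∀ (l : List Int), Dom_fin l → Pre_fin l → Spec_fin l (fin l)

-- ===== LEMMAS AND PROOFS =====

-- find? over a filter
theorem pvFindFilter (p q : Int → Bool) (l : List Int) :
    (l.filter p).find? q = l.find? fun a => p a && q a := by
  induction l with
  | nil => rfl
  | cons x xs ih =>
    by_cases h : p x
    · by_cases hq : q x <;> simp [h, hq, ih]
    · simp [h, ih]

-- find? only depends on the predicate's values on members
theorem pvFindCongr (p q : Int → Bool) (l : List Int) (h : ∀ x ∈ l, p x = q x) :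
    l.find? p = l.find? q := by
  induction l with
  | nil => rfl
  | cons x xs ih =>
    have hx := h x (by simp)
    by_cases hp : p x
    · simp [hp, hx ▸ hp]
    · have hq : q x = false := by rw [← hx]; simpa using hp
      simp [hp, hq, ih (fun y hy => h y (by simp [hy]))]

-- one reduction-mod-cn step commutes through the affine composition
theorem pvStepArith (u i j : Int) :
    PySem.Int.mod (u * PySem.Int.mod (i * i) pvCn + PySem.Int.mod (i * j + j) pvCn) pvCn
      = pvNor (pvNor u i j) i j := by
  simp only [pvNor, pvCn, pvCn, PySem.Int.mod_eq_emod_of_pos (by norm_num : (0:Int) < 10001)]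
  have h1 : ∀ a : Int, a % (10001:Int) ≡ a [ZMOD (10001:Int)] := fun a => Int.emod_emod_of_dvd a dvd_rfl
  have e1 : u * ((i*i) % 10001) + (i*j+j) % 10001 ≡ u*(i*i) + (i*j+j) [ZMOD 10001] :=
    ((h1 _).mul_left u).add (h1 _)
  have e2 : (u*i+j) % 10001 * i + j ≡ (u*i+j)*i + j [ZMOD 10001] := ((h1 _).mul_right i).add_right j
  have e3 : u*(i*i)+(i*j+j) = (u*i+j)*i+j := by ring
  exact e1.trans (e3 ▸ e2.symm)

-- the index loop over range(len(l)-1) is the loop over consecutive pairs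
theorem pvAllRange (g : Int → Int → Bool) (l : List Int) :
    (List.range (l.length - 1)).all (fun k => g (l.getD k 0) (l.getD (k+1) 0))
      = (l.zip l.tail).all (fun p => g p.1 p.2) := by
  induction l with
  | nil => rfl
  | cons x xs ih =>
    cases xs with
    | nil => rfl
    | cons y r =>
      simp only [List.length_cons, Nat.add_sub_cancel, List.range_succ_eq_map,
        List.all_cons, List.all_map, List.getD_cons_succ, List.getD_cons_zero,
        List.tail_cons, List.zip_cons_cons]
      have := ih
      simp only [List.length_cons, Nat.add_sub_cancel, List.tail_cons] at this
      rw [← this]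
      rfl

theorem pvCheckA_zip (l : List Int) (i j : Int) :
    pvCheckA l i j = (l.zip l.tail).all (fun p => pvNor (pvNor p.1 i j) i j == p.2) := by
  unfold pvCheckA
  rw [PySem.List.pyRange_one, List.all_map,
    show (((l.length : Int) - 1) - 0).toNat = l.length - 1 from by omega,
    ← pvAllRange (fun u v => pvNor (pvNor u i j) i j == v) l]
  congr 1
  funext k
  simp only [Function.comp_apply]
  have h1 : PySem.List.pyGetD l ((0:Int) + (k:Int)) 0 = l.getD k 0 := by
    rw [zero_add]; exact PySem.List.pyGetD_natCast l k 0
  have h2 : PySem.List.pyGetD l ((0:Int) + (k : Int) + 1) 0 = l.getD (k+1) 0 := by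
    rw [zero_add, show ((k : Int) + 1) = ((k + 1 : Nat) : Int) from by push_cast; ring]
    exact PySem.List.pyGetD_natCast l (k+1) 0
  rw [h1, h2]

-- B's pair check with the composed coefficients is A's double-nor check
theorem pvCheckB_eq_checkA (l : List Int) (i j : Int) :
    pvCheckB (l.zip (PySem.List.slice l (some 1) none))
        (PySem.Int.mod (i * i) pvCn) (PySem.Int.mod (i * j + j) pvCn) = pvCheckA l i j := by
  rw [pvCheckA_zip]
  unfold pvCheckB
  rw [PySem.List.slice_from_one]
  congr 1
  funext p
  rw [pvStepArith p.1 i j]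

-- if the whole sequence checks out then j satisfies the linear congruence from the first pair
theorem pvCheckA_cong (x y i j : Int) (r : List Int) (h : pvCheckA (x :: y :: r) i j = true) :
    PySem.Int.mod (j * (i + 1)) pvCn = PySem.Int.mod (y - x * (i * i)) pvCn := by
  rw [pvCheckA_zip] at h
  simp only [List.tail_cons, List.zip_cons_cons, List.all_cons, Bool.and_eq_true, beq_iff_eq] at h
  have hy : pvNor (pvNor x i j) i j = y := h.1
  simp only [pvNor, pvCn, PySem.Int.mod_eq_emod_of_pos (by norm_num : (0:Int) < 10001)] at hy ⊢
  have h1 : ∀ a : Int, a % (10001:Int) ≡ a [ZMOD (10001:Int)] := fun a => Int.emod_emod_of_dvd a dvd_rfl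
  have e1 : y ≡ (x*i+j)*i + j [ZMOD 10001] := by
    rw [← hy]; exact (h1 _).trans (((h1 _).mul_right i).add_right j)
  have e2 : y - x*(i*i) ≡ (x*i+j)*i + j - x*(i*i) [ZMOD 10001] := e1.sub_right _
  have e3 : (x*i+j)*i + j - x*(i*i) = j*(i+1) := by ring
  exact (e2.trans (by rw [e3])).symm

-- if |z-y| ≥ cn, the i-filter of A never passes
theorem pvANoMatch (l : List Int) (x y z : Int) (hd : |z - y| ≥ pvCn) :
    ∀ is : List Int, pvFinA l x y z is = (0, 0) := by
  intro is
  induction is with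
  | nil => rfl
  | cons i is ih =>
    have habs : |PySem.Int.mod (i ^ 2 * (y - x)) pvCn| < pvCn := by
      rw [abs_of_nonneg (PySem.Int.mod_nonneg _ (by norm_num [pvCn]))]
      exact PySem.Int.mod_lt _ (by norm_num [pvCn])
    have hne : (|z - y| == |PySem.Int.mod (i ^ 2 * (y - x)) pvCn|) = false := by
      rw [beq_eq_false_iff_ne]; omega
    rw [pvFinA, hne, if_neg (by simp), ih]

-- the iterative extended Euclid keeps a positive common divisor and a Bézout coefficient
theorem pvEgcdLoop_spec (a b : Int) : ∀ aa bb x0 x1 : Int, 0 < aa → 0 ≤ bb →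
    (∃ y0, x0 * a + y0 * b = aa) → (∃ y1, x1 * a + y1 * b = bb) →
    (∀ d : Int, d ∣ aa ∧ d ∣ bb ↔ d ∣ a ∧ d ∣ b) →
    0 < (pvEgcdLoop aa bb x0 x1).1 ∧ (pvEgcdLoop aa bb x0 x1).1 ∣ a ∧
      (pvEgcdLoop aa bb x0 x1).1 ∣ b ∧
      ∃ v, (pvEgcdLoop aa bb x0 x1).2 * a + v * b = (pvEgcdLoop aa bb x0 x1).1 := by
  intro aa bb x0 x1
  induction aa, bb, x0, x1 using pvEgcdLoop.induct with
  | case1 aa x0 x1 =>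
    intro h0 _ hx0 _ hdd
    rw [pvEgcdLoop, if_pos rfl]
    obtain ⟨ha, hb⟩ := (hdd aa).mp ⟨dvd_refl aa, dvd_zero aa⟩
    exact ⟨h0, ha, hb, hx0⟩
  | case2 aa bb x0 x1 hb ih =>
    intro h0 h1 hx0 hx1 hdd
    have hbpos : 0 < bb := lt_of_le_of_ne h1 (Ne.symm hb)
    have hid := PySem.Int.floordiv_mul_add_mod aa bb
    have he : aa - PySem.Int.floordiv aa bb * bb = PySem.Int.mod aa bb := by omega
    rw [pvEgcdLoop, if_neg hb]
    refine ih hbpos ?_ hx1 ?_ ?_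
    · rw [he]; exact PySem.Int.mod_nonneg aa hbpos
    · obtain ⟨y0, hy0⟩ := hx0
      obtain ⟨y1, hy1⟩ := hx1
      exact ⟨y0 - PySem.Int.floordiv aa bb * y1,
        by linear_combination hy0 - PySem.Int.floordiv aa bb * hy1⟩
    · intro d
      rw [← hdd d]
      constructor
      · rintro ⟨hdb, hdr⟩
        refine ⟨?_, hdb⟩
        have := dvd_add hdr (hdb.mul_left (PySem.Int.floordiv aa bb))
        have he2 : aa - PySem.Int.floordiv aa bb * bb + PySem.Int.floordiv aa bb * bb = aa := by
          ring
        rwa [he2] at this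
      · rintro ⟨hda, hdb⟩
        exact ⟨hdb, dvd_sub hda (hdb.mul_left _)⟩

theorem pvEgcdMain (a b : Int) (ha : 0 < a) (hb : 0 < b) :
    0 < (pvEgcdLoop a b 1 0).1 ∧ (pvEgcdLoop a b 1 0).1 ∣ a ∧ (pvEgcdLoop a b 1 0).1 ∣ b ∧
      ∃ v, (pvEgcdLoop a b 1 0).2 * a + v * b = (pvEgcdLoop a b 1 0).1 :=
  pvEgcdLoop_spec a b a b 1 0 ha (le_of_lt hb) ⟨0, by ring⟩ ⟨1, by ring⟩
    (fun d => Iff.rfl)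

-- B's inner loop over k is find? over the candidate list
theorem pvBKFind (pairs : List (Int × Int)) (i a j0 m : Int) (ks : List Int) :
    pvFinBK pairs i a j0 m ks
      = ((ks.map (fun k => j0 + k * m)).find?
          (fun j => pvCheckB pairs a (PySem.Int.mod (i * j + j) pvCn))).map (fun j => (i, j)) := by
  induction ks with
  | nil => rfl
  | cons k ks ih =>
    rw [pvFinBK, List.map_cons]
    by_cases hchk : pvCheckB pairs a (PySem.Int.mod (i * (j0 + k * m) + (j0 + k * m)) pvCn) = true
    · rw [List.find?_cons_of_pos (by simpa using hchk)]
      simp only [hchk, if_true]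
      rfl
    · rw [List.find?_cons_of_neg (by simpa using hchk)]
      simp only [Bool.not_eq_true] at hchk
      rw [hchk]
      simpa using ih

-- B's candidate list is the ordered list of congruence solutions in range(cn)
theorem pvCandGcd (i c g u v : Int) (_hi : 0 ≤ i) (hc0 : 0 ≤ c) (hc1 : c < pvCn)
    (hg : 0 < g) (hga : g ∣ (i + 1)) (hgb : g ∣ pvCn)
    (hbez : u * (i + 1) + v * pvCn = g) (hdc : g ∣ c) :
    (PySem.List.pyRange 0 g 1).map (fun k =>
        PySem.Int.mod (PySem.Int.floordiv c g * u) (PySem.Int.floordiv pvCn g)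
          + k * PySem.Int.floordiv pvCn g)
      = (PySem.List.pyRange 0 pvCn 1).filter (fun j => PySem.Int.mod (j * (i + 1)) pvCn == c) := by
  have hcn : (0:Int) < pvCn := by norm_num [pvCn]
  have hgne : g ≠ 0 := ne_of_gt hg
  set m := PySem.Int.floordiv pvCn g with hmdef
  have hm : m * g = pvCn := by
    rw [hmdef, PySem.Int.floordiv_eq_ediv_of_pos hg]
    exact Int.ediv_mul_cancel hgb
  have hm0 : 0 < m := by nlinarith [hm, hg, hcn]
  set j0 := PySem.Int.mod (PySem.Int.floordiv c g * u) m with hj0def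
  have hj00 : 0 ≤ j0 := PySem.Int.mod_nonneg _ hm0
  have hj01 : j0 < m := PySem.Int.mod_lt _ hm0
  obtain ⟨a', ha'⟩ := hga
  obtain ⟨c', hc'⟩ := hdc
  have hcdiv : PySem.Int.floordiv c g = c' := by
    rw [PySem.Int.floordiv_eq_ediv_of_pos hg, hc', Int.mul_ediv_cancel_left _ hgne]
  set q := (c' * u) / m with hqdef
  have hj0' : j0 = c' * u - m * q := by
    rw [hj0def, hcdiv, PySem.Int.mod_eq_emod_of_pos hm0, Int.emod_def, hqdef]
  -- each candidate solves the congruence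
  have hsol : ∀ k : Int, pvCn ∣ (j0 + k * m) * (i + 1) - c := by
    intro k
    refine ⟨(k - q) * a' - c' * v, ?_⟩
    linear_combination (i + 1) * hj0' + c' * hbez + ((k - q)) * m * ha' + ((k - q)) * a' * hm - hc'
  -- the bidirectional membership characterization
  have hmem : ∀ j : Int,
      (∃ k, (0 ≤ k ∧ k < g) ∧ j0 + k * m = j) ↔ (0 ≤ j ∧ j < pvCn ∧ pvCn ∣ j * (i + 1) - c) := by
    intro j
    constructor
    · rintro ⟨k, ⟨hk0, hk1⟩, rfl⟩
      have hkm : 0 ≤ k * m := mul_nonneg hk0 (le_of_lt hm0)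
      have hub : k * m ≤ (g - 1) * m := mul_le_mul_of_nonneg_right (by omega) (le_of_lt hm0)
      exact ⟨by omega, by nlinarith, hsol k⟩
    · rintro ⟨hj0le, hjlt, hdvd⟩
      have hd0 : pvCn ∣ (j - j0) * (i + 1) := by
        have h := dvd_sub hdvd (hsol 0)
        have he : (j * (i + 1) - c) - ((j0 + 0 * m) * (i + 1) - c) = (j - j0) * (i + 1) := by ring
        rwa [he] at h
      obtain ⟨s, hs⟩ := hd0
      have hcancel : (j - j0) * a' = m * s := by
        have h1 : ((j - j0) * a') * g = (m * s) * g := by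
          have : (j - j0) * (g * a') = (m * g) * s := by rw [← ha', hm]; exact hs
          linear_combination this
        exact mul_right_cancel₀ hgne h1
      have hcop : IsCoprime m a' := by
        have h1 : g * (u * a' + v * m) = g * 1 := by
          have : u * (g * a') + v * (m * g) = g := by rw [← ha', hm]; exact hbez
          linear_combination this
        have h2 : u * a' + v * m = 1 := mul_left_cancel₀ hgne h1
        exact ⟨v, u, by linarith⟩
      have hmdvd : m ∣ j - j0 := hcop.dvd_of_dvd_mul_right ⟨s, hcancel⟩
      obtain ⟨t, ht⟩ := hmdvd
      refine ⟨t, ⟨?_, ?_⟩, by linarith [mul_comm m t]⟩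
      · by_contra hneg
        have h2 : m * t ≤ m * (-1) := mul_le_mul_of_nonneg_left (by omega) (le_of_lt hm0)
        linarith
      · by_contra hge
        have h2 : m * g ≤ m * t := mul_le_mul_of_nonneg_left (by omega) (le_of_lt hm0)
        linarith [hm]
  -- both lists enumerate this set strictly increasingly
  have hpwL : ((PySem.List.pyRange 0 g 1).map (fun k => j0 + k * m)).Pairwise (· < ·) := by
    rw [List.pairwise_map]
    refine (PySem.List.pairwise_lt_pyRange_one 0 g).imp ?_
    intro k k' hkk
    have : k * m < k' * m := mul_lt_mul_of_pos_right hkk hm0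
    omega
  have hpwR : ((PySem.List.pyRange 0 pvCn 1).filter
      (fun j => PySem.Int.mod (j * (i + 1)) pvCn == c)).Pairwise (· < ·) :=
    (PySem.List.pairwise_lt_pyRange_one 0 pvCn).filter _
  refine PySem.List.eq_of_perm_of_pairwise_le ?_ (hpwL.imp le_of_lt) (hpwR.imp le_of_lt)
  refine (List.perm_ext_iff_of_nodup (hpwL.imp ne_of_lt) (hpwR.imp ne_of_lt)).mpr ?_
  intro j
  rw [List.mem_map, List.mem_filter, PySem.List.mem_pyRange_one, beq_iff_eq]
  constructor
  · rintro ⟨k, hkmem, hkj⟩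
    rw [PySem.List.mem_pyRange_one] at hkmem
    obtain ⟨hj0le, hjlt, hdvd⟩ := (hmem j).mp ⟨k, by omega, hkj⟩
    refine ⟨⟨hj0le, hjlt⟩, ?_⟩
    obtain ⟨w, hw⟩ := hdvd
    rw [PySem.Int.mod_eq_emod_of_pos hcn,
      show j * (i + 1) = c + w * pvCn from by linarith,
      Int.add_mul_emod_self_right]
    exact Int.emod_eq_of_lt hc0 hc1
  · rintro ⟨⟨hj0le, hjlt⟩, hmod⟩
    have hdvd : pvCn ∣ j * (i + 1) - c := by
      apply Int.dvd_of_emod_eq_zero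
      rw [PySem.Int.mod_eq_emod_of_pos hcn] at hmod
      rw [Int.sub_emod, hmod, Int.emod_eq_of_lt hc0 hc1, sub_self, Int.zero_emod]
    obtain ⟨k, hk, hkj⟩ := (hmem j).mpr ⟨hj0le, hjlt, hdvd⟩
    exact ⟨k, PySem.List.mem_pyRange_one.mpr (by omega), hkj⟩

-- when g does not divide c the congruence — hence A's full check — has no solution
theorem pvNoSol (x y z i c g : Int) (r : List Int)
    (hc : c = PySem.Int.mod (y - x * (i * i)) pvCn)
    (hga : g ∣ (i + 1)) (hgb : g ∣ pvCn) (hndvd : ¬ g ∣ c) :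
    (PySem.List.pyRange 0 pvCn 1).find? (fun j => pvCheckA (x :: y :: z :: r) i j) = none := by
  rw [List.find?_eq_none]
  intro j _ hchk
  apply hndvd
  have hcong := pvCheckA_cong x y i j (z :: r) hchk
  rw [← hc] at hcong
  have hcn : (0:Int) < pvCn := by norm_num [pvCn]
  rw [PySem.Int.mod_eq_emod_of_pos hcn] at hcong
  rw [← hcong, Int.emod_def]
  exact dvd_sub (hga.mul_left j) (hgb.mul_right _)

-- main induction over the shared i-list
theorem pvMainLoop (x y z : Int) (r : List Int) :
    ∀ is : List Int, (∀ i ∈ is, 0 ≤ i) →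
      pvFinA (x :: y :: z :: r) x y z is
        = pvFinB ((x :: y :: z :: r).zip (PySem.List.slice (x :: y :: z :: r) (some 1) none))
            x y (|z - y|) is := by
  intro is
  induction is with
  | nil => intro _; rfl
  | cons i is ih =>
    intro hmem
    have hi : 0 ≤ i := hmem i (by simp)
    have ihs := ih (fun j hj => hmem j (by simp [hj]))
    have hsq : i ^ 2 = i * i := sq i
    rw [pvFinA]
    simp only [pvFinB, hsq]
    by_cases hcond : |z - y| = |PySem.Int.mod (i * i * (y - x)) pvCn|
    · rw [if_pos (by simpa using hcond), if_neg (by simpa using hcond)]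
      set c := PySem.Int.mod (y - x * (i * i)) pvCn with hc
      have hc0 : 0 ≤ c := PySem.Int.mod_nonneg _ (by norm_num [pvCn])
      have hc1 : c < pvCn := PySem.Int.mod_lt _ (by norm_num [pvCn])
      obtain ⟨hg, hga, hgb, v, hbez⟩ :=
        pvEgcdMain (i + 1) pvCn (by omega) (by norm_num [pvCn])
      by_cases hdvd : PySem.Int.mod c (pvEgcdLoop (i + 1) pvCn 1 0).1 = 0
      · rw [if_neg (by simpa using hdvd)]
        rw [pvBKFind,
          pvCandGcd i c (pvEgcdLoop (i + 1) pvCn 1 0).1 (pvEgcdLoop (i + 1) pvCn 1 0).2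
            v hi hc0 hc1 hg hga hgb hbez
            ((PySem.Int.mod_eq_zero_iff_dvd _ _).mp hdvd),
          pvFindFilter]
        have hfind : ((PySem.List.pyRange 0 pvCn 1).find?
              fun j => (PySem.Int.mod (j * (i + 1)) pvCn == c)
                && pvCheckB ((x :: y :: z :: r).zip
                      (PySem.List.slice (x :: y :: z :: r) (some 1) none))
                     (PySem.Int.mod (i * i) pvCn) (PySem.Int.mod (i * j + j) pvCn))
            = (PySem.List.pyRange 0 pvCn 1).find? fun j => pvCheckA (x :: y :: z :: r) i j := by
          refine pvFindCongr _ _ _ (fun j _ => ?_)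
          rw [pvCheckB_eq_checkA]
          by_cases hA : pvCheckA (x :: y :: z :: r) i j = true
          · rw [hA, Bool.and_true, beq_iff_eq]
            simp [pvCheckA_cong x y i j (z :: r) hA, hc]
          · simp only [Bool.not_eq_true] at hA
            rw [hA, Bool.and_false]
        rw [hfind]
        cases hval : (PySem.List.pyRange 0 pvCn 1).find? fun j => pvCheckA (x :: y :: z :: r) i j with
        | none => simpa using ihs
        | some j => simp
      · rw [if_pos (by simpa using hdvd)]
        rw [pvNoSol x y z i c (pvEgcdLoop (i + 1) pvCn 1 0).1 r hc hga hgb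
          (fun hd => hdvd ((PySem.Int.mod_eq_zero_iff_dvd _ _).mpr hd))]
        exact ihs
    · rw [if_neg (by simpa using hcond), if_pos (by simpa using hcond), ihs]

-- ===== VERDICT (by name: the statement is the Claim_ definition above) =====
theorem fin_spec : Claim_equal_fin := by
  intro l hdom hpre
  unfold Spec_fin
  match l, hpre with
  | x :: y :: z :: r, _ =>
    show pvFinA (x :: y :: z :: r) x y z (PySem.List.pyRange 0 pvCn 1)
      = if |z - y| ≥ pvCn then (0, 0)
        else pvFinB ((x :: y :: z :: r).zip
              (PySem.List.slice (x :: y :: z :: r) (some 1) none))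
            x y (|z - y|) (PySem.List.pyRange 0 pvCn 1)
    by_cases hd : |z - y| ≥ pvCn
    · rw [if_pos hd]
      exact pvANoMatch _ x y z hd _
    · rw [if_neg hd]
      exact pvMainLoop x y z r _ (fun i him => (PySem.List.mem_pyRange_one.mp him).1)
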